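-- pv_equiv track=rewrite | github.com/atidyshirt/University | COSC262/finalPractice/QuizPractice/quiz2.py | dumbo_func
-- ===== SOURCE A (Python) =====
-- def dumbo_func(data, i=0):
--     """Takes a list of numbers and does weird stuff with it"""
--     if i >= len(data):
--         return 0
--     else:
--         c = dumbo_func(data, i + 1)
--         if (data[i] // 100) % 3 != 0:
--             c += 1
--         return c
-- ===== SOURCE B (Python) =====
-- def dumbo_func(data, i=0):
--     """Takes a list of numbers and does weird stuff with it"""
--     return sum(1 for x in data[i:] if (x // 100) % 3 != 0)
-- ===== Notes on version B (the rewrite author's own statement) =====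
-- stated objective: simpler
-- what changed: Replaced the recursion with a one-line count over the slice data[i:], so for negative i B counts the suffix once instead of reproducing A's wraparound double count.
-- intended difference: For -len(data) <= i < 0 A's recursion wraps around and counts the last -i elements plus the whole list again, while B counts only the suffix data[i:], which is the intended count from offset i. — e.g. on dumbo_func([100], -1): A returns 2, B returns 1
import Mathlib
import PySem

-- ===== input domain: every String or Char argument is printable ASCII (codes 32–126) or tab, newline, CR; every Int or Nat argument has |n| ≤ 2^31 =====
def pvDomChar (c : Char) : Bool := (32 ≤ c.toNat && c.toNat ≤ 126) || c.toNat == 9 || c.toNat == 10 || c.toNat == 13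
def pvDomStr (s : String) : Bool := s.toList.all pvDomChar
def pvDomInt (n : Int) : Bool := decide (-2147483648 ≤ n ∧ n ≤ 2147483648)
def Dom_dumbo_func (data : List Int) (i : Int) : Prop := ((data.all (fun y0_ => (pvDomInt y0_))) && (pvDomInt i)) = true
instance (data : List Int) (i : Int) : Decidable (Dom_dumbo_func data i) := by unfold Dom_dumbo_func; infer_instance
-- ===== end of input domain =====

-- B counts the slice data[i:] in one pass instead of A's recursion; for negative i (D_) B counts the suffix once where A double-counts via wraparound. Objective: simpler.


-- ===== PORT A =====
def dumbo_func (data : List Int) (i : Int) : Int :=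
  if i ≥ (data.length : Int) then 0
  else
    let c := dumbo_func data (i + 1)
    if PySem.Int.mod (PySem.Int.floordiv ((PySem.List.pyGet? data i).getD 0) 100) 3 ≠ 0 then
      c + 1
    else c
termination_by ((data.length : Int) - i).toNat
decreasing_by omega

-- ===== PORT B =====
-- sum(1 for x in data[i:] if (x // 100) % 3 != 0)
def dumbo_func_alt (data : List Int) (i : Int) : Int :=
  ((PySem.List.slice data (some i) none).filter
      (fun x => PySem.Int.mod (PySem.Int.floordiv x 100) 3 != 0)).length

-- ===== PRECONDITION & SPEC =====
-- Pre_ excludes exactly the inputs with i < -len(data), on which A raises IndexError.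
def Pre_dumbo_func (data : List Int) (i : Int) : Prop := -(data.length : Int) ≤ i
instance (data : List Int) (i : Int) : Decidable (Pre_dumbo_func data i) := by
  unfold Pre_dumbo_func; infer_instance
def pvWitness_dumbo_func : List Int × Int := ([100, 250, 7], 0)

-- For -len(data) ≤ i < 0 A's recursion wraps around and counts the last -i elements plus the
-- whole list again, while B counts only the suffix data[i:], the intended count from offset i.
def D_dumbo_func (data : List Int) (i : Int) : Prop := i < 0
instance (data : List Int) (i : Int) : Decidable (D_dumbo_func data i) := by
  unfold D_dumbo_func; infer_instance

def Spec_dumbo_func (data : List Int) (i : Int) (out : Int) : Prop :=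
  ¬ D_dumbo_func data i → out = dumbo_func_alt data i
instance (data : List Int) (i : Int) (out : Int) : Decidable (Spec_dumbo_func data i out) := by
  unfold Spec_dumbo_func; infer_instance

def pvDiffWitness_dumbo_func : List Int × Int := ([100], -1)
def pvDiffWitnessOut_dumbo_func : Int × Int := (2, 1)

-- ===== CLAIM (what is proved, stated in full; the proofs are below) =====
def Claim_unchanged_dumbo_func : Prop := ∀ (data : List Int) (i : Int),
  Dom_dumbo_func data i → Pre_dumbo_func data i → Spec_dumbo_func data i (dumbo_func data i)
def Claim_changed_dumbo_func : Prop :=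
  Dom_dumbo_func (pvDiffWitness_dumbo_func.1) (pvDiffWitness_dumbo_func.2) ∧
  Pre_dumbo_func (pvDiffWitness_dumbo_func.1) (pvDiffWitness_dumbo_func.2) ∧
  D_dumbo_func (pvDiffWitness_dumbo_func.1) (pvDiffWitness_dumbo_func.2) ∧
  dumbo_func (pvDiffWitness_dumbo_func.1) (pvDiffWitness_dumbo_func.2) = pvDiffWitnessOut_dumbo_func.1 ∧
  dumbo_func_alt (pvDiffWitness_dumbo_func.1) (pvDiffWitness_dumbo_func.2) = pvDiffWitnessOut_dumbo_func.2 ∧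
  pvDiffWitnessOut_dumbo_func.1 ≠ pvDiffWitnessOut_dumbo_func.2

-- ===== LEMMAS AND PROOFS =====

-- A's recursion from a nonnegative offset i equals B's count over the suffix data.drop i.toNat.
theorem dumbo_key (data : List Int) :
    ∀ (n : Nat) (i : Int), 0 ≤ i → ((data.length : Int) - i).toNat = n →
      dumbo_func data i =
        ((data.drop i.toNat).filter
          (fun x => PySem.Int.mod (PySem.Int.floordiv x 100) 3 != 0)).length := by
  intro n
  induction n with
  | zero =>
    intro i h0 h
    have hge : (data.length : Int) ≤ i := by omega
    have : data.length ≤ i.toNat := by omega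
    rw [dumbo_func, List.drop_eq_nil_of_le this]
    simp [hge]
  | succ n ih =>
    intro i h0 h
    have hlt : i < (data.length : Int) := by omega
    have hk : i.toNat < data.length := by omega
    rw [dumbo_func, List.drop_eq_getElem_cons hk]
    have hrec := ih (i + 1) (by omega) (by omega)
    have hidx : (i + 1).toNat = i.toNat + 1 := by omega
    rw [hidx] at hrec
    have hget : (PySem.List.pyGet? data i).getD 0 = data[i.toNat] := by
      simp [PySem.List.pyGet?, PySem.List.pyIdx?, h0, hlt]
    simp only [List.filter_cons, not_le.mpr hlt, hget]
    rw [if_neg not_false, hrec]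
    simp only [bne_iff_ne]
    split_ifs with hq <;> simp [List.length_cons]

-- ===== VERDICT (by name: the statement is the Claim_ definition above) =====
theorem dumbo_witnessA : dumbo_func [100] (-1) = 2 := by
  rw [dumbo_func, dumbo_func, dumbo_func]
  norm_num
  decide

theorem dumbo_func_spec : Claim_unchanged_dumbo_func := by
  intro data i _ _ hnd
  have h0 : 0 ≤ i := by
    unfold D_dumbo_func at hnd; omega
  show dumbo_func data i = dumbo_func_alt data i
  unfold dumbo_func_alt
  rw [PySem.List.slice_from _ h0]
  exact dumbo_key data ((data.length : Int) - i).toNat i h0 rfl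

theorem dumbo_func_changed : Claim_changed_dumbo_func := by
  unfold Claim_changed_dumbo_func
  exact ⟨by decide, by decide, by decide, dumbo_witnessA, by decide, by decide⟩
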